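-- pv_equiv track=rewrite | github.com/kitab-project-org/OpenITI_Chapter | data/Shamela_ws_IA_snapshots/extract_data.py | create_time_series
-- ===== SOURCE A (Python) =====
-- def create_time_series(topic_d):
--     """
--     Returns:
--         dict (k: topic, v: list of counts)
--     """
--     all_topics = set()
--     for date, d in topic_d.items():
--         for topic in d:
--             all_topics.add(topic)
--     all_topics = {t: [] for t in all_topics}
--     for t in all_topics:
--         series = []
--         for date, d in sorted(topic_d.items()):
--             if t in d:
--                 series.append(str(d[t]))
--             else:
--                 series.append("0")
--         all_topics[t] = series
--     return all_topics
-- ===== SOURCE B (Python) =====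
-- def create_time_series(topic_d):
--     """
--     Returns:
--         dict (k: topic, v: list of counts)
--     """
--     items = sorted(topic_d.items())
--     n = len(items)
--     series = {}
--     for d in topic_d.values():
--         for t in d:
--             if t not in series:
--                 series[t] = ["0"] * n
--     for i, (date, d) in enumerate(items):
--         for t in d:
--             series[t][i] = str(d[t])
--     return series
-- ===== Notes on version B (the rewrite author's own statement) =====
-- stated objective: faster
-- what changed: B sorts the dates once, pre-fills each topic's series with n zero-strings, and then makes a single sparse pass over the sorted dates writing str(count) into position i only for the topics present on date i (index assignment, no per-topic membership test), instead of A's per-topic re-sort and full re-scan of all dates with an append-or-zero fallback.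
import Mathlib
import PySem

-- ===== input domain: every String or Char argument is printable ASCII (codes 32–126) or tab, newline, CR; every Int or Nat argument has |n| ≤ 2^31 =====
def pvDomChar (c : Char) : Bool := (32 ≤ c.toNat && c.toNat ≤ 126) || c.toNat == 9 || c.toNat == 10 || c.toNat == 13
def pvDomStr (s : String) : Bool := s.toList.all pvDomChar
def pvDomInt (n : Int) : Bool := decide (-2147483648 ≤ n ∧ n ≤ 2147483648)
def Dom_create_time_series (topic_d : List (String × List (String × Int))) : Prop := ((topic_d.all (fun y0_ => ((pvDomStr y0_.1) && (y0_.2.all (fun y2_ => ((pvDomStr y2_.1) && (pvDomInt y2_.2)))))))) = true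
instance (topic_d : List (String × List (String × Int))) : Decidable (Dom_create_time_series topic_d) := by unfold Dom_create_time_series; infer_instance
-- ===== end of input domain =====

-- B sorts the dates once, pre-fills every topic's series with "0"s and overwrites positions
-- in one sparse pass over the sorted dates, instead of A's per-topic re-sort and full re-scan.


-- `str(d[t]) if t in d else "0"` on an inner dict (A's loop body)
def pvEntry (d : List (String × Int)) (t : String) : String :=
  if (PySem.Dict.mk d).contains t then PySem.Int.toStr ((PySem.Dict.mk d).getD t 0) else "0"

-- ===== PORT A =====
def create_time_series (topic_d : List (String × List (String × Int))) : List (String × List String) :=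
  -- all_topics = set(); for date, d in topic_d.items(): for topic in d: all_topics.add(topic)
  let all_topics : PySem.Set String :=
    topic_d.foldl (fun s p => p.2.foldl (fun s q => s.add q.1) s) PySem.Set.empty
  -- all_topics = {t: [] for t in all_topics}
  let d0 : PySem.Dict String (List String) :=
    all_topics.foldl (fun d t => d.insert t []) PySem.Dict.empty
  -- for t in all_topics: series = []; for date, d in sorted(topic_d.items()): …; all_topics[t] = series
  let d1 : PySem.Dict String (List String) :=
    all_topics.foldl (fun d t =>
      d.insert t ((PySem.List.sorted topic_d (fun p => p.1) false).foldl
        (fun series p => series ++ [pvEntry p.2 t]) [])) d0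
  d1.items

-- ===== PORT B =====
def create_time_series_alt (topic_d : List (String × List (String × Int))) : List (String × List String) :=
  -- items = sorted(topic_d.items()); n = len(items)
  let items := PySem.List.sorted topic_d (fun p => p.1) false
  let n := items.length
  -- series = {}; for d in topic_d.values(): for t in d: if t not in series: series[t] = ["0"] * n
  let series0 : PySem.Dict String (List String) :=
    topic_d.foldl (fun s p => p.2.foldl (fun s q =>
      if s.contains q.1 then s else s.insert q.1 (List.replicate n "0")) s) PySem.Dict.empty
  -- for i, (date, d) in enumerate(items): for t in d: series[t][i] = str(d[t])
  -- (t always a key of series, and 0 ≤ i < len(series[t]): Python raises nowhere here;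
  --  `d[t]` is the dict lookup, first match on the association list)
  let series : PySem.Dict String (List String) :=
    (PySem.List.enumerate items 0).foldl (fun s ip =>
      ip.2.2.foldl (fun s q =>
        s.modify q.1 [] (fun l =>
          PySem.List.pySetD l ip.1 (PySem.Int.toStr ((PySem.Dict.mk ip.2.2).getD q.1 0)))) s) series0
  series.items

-- ===== PRECONDITION & SPEC =====
def Spec_create_time_series (topic_d : List (String × List (String × Int))) (out : List (String × List String)) : Prop := out = create_time_series_alt topic_d
instance (topic_d : List (String × List (String × Int))) (out : List (String × List String)) : Decidable (Spec_create_time_series topic_d out) := by unfold Spec_create_time_series; infer_instance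

-- ===== CLAIM (what is proved, stated in full; the proofs are below) =====
def Claim_equal_create_time_series : Prop := ∀ (topic_d : List (String × List (String × Int))), Dom_create_time_series topic_d → Spec_create_time_series topic_d (create_time_series topic_d)

-- ===== LEMMAS AND PROOFS =====

-- A's nested set-building loop collects exactly the deduped flattened key list.
theorem pv_topics_eq (l : List (String × List (String × Int))) (s : PySem.Set String) :
    l.foldl (fun s p => p.2.foldl (fun s q => s.add q.1) s) s
      = PySem.Set.update s (l.flatMap (fun p => p.2.map (fun q => q.1))) := by
  induction l generalizing s with
  | nil => simp [PySem.Set.update]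
  | cons p l ih =>
      simp only [List.foldl_cons, List.flatMap_cons, PySem.Set.update, List.foldl_append]
      rw [ih]
      rw [← PySem.Set.update_map_eq_foldl_add]
      rfl

-- lookup after an insert-loop over keys not containing t is unchanged
theorem pv_getD_foldl_insert_not_mem {V : Type} (l : List String) (f : String → V)
    (d : PySem.Dict String V) (t : String) (d0 : V) (ht : t ∉ l) :
    (l.foldl (fun d x => d.insert x (f x)) d).getD t d0 = d.getD t d0 := by
  induction l generalizing d with
  | nil => rfl
  | cons a l ih =>
      simp only [List.foldl_cons]
      have hta1 : t ≠ a := fun h => ht (h ▸ List.mem_cons_self ..)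
      have hta2 : t ∉ l := fun h => ht (List.mem_cons_of_mem _ h)
      rw [ih (d.insert a (f a)) hta2, PySem.Dict.getD_insert, if_neg hta1]

-- lookup after an insert-loop over a Nodup key list containing t yields t's inserted value
theorem pv_getD_foldl_insert_mem {V : Type} (l : List String) (f : String → V)
    (d : PySem.Dict String V) (t : String) (d0 : V) (hnd : l.Nodup) (ht : t ∈ l) :
    (l.foldl (fun d x => d.insert x (f x)) d).getD t d0 = f t := by
  induction l generalizing d with
  | nil => cases ht
  | cons a l ih =>
      simp only [List.foldl_cons]
      rcases List.mem_cons.mp ht with h | h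
      · subst h
        rw [pv_getD_foldl_insert_not_mem l f _ t d0 (by simp_all)]
        rw [PySem.Dict.getD_insert]; simp
      · exact ih _ (by simp_all) h

-- adding already-present elements leaves a set unchanged
theorem pv_update_self (s : PySem.Set String) (l : List String) (h : ∀ x ∈ l, x ∈ s) :
    PySem.Set.update s l = s := by
  induction l generalizing s with
  | nil => rfl
  | cons a l ih =>
      have ham : a ∈ s := h a (List.mem_cons_self ..)
      show PySem.Set.update (s.add a) l = s
      rw [show s.add a = s from by simp [PySem.Set.add, ham]]
      exact ih s (fun x hx => h x (by simp [hx]))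

-- keys of the dict built by an insert-loop over a Nodup key list from empty are that list
theorem pv_keys_foldl_insert_empty {V : Type} (l : List String) (f : PySem.Dict String V → String → V)
    (hnd : l.Nodup) :
    (l.foldl (fun d x => d.insert x (f d x)) PySem.Dict.empty).keys = l := by
  rw [PySem.Dict.keys_foldl_insert]
  show PySem.Set.ofList l = l
  exact PySem.Set.ofList_eq_self_of_nodup l hnd

-- keys of B's guarded-insert loop over one inner dict
theorem pv_keys_guardfold (n : Nat) (es : List (String × Int)) (s : PySem.Dict String (List String)) :
    (es.foldl (fun s q => if s.contains q.1 then s else s.insert q.1 (List.replicate n "0")) s).keys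
      = PySem.Set.update s.keys (es.map (fun q => q.1)) := by
  induction es generalizing s with
  | nil => rfl
  | cons q es ih =>
      simp only [List.foldl_cons, List.map_cons]
      by_cases hc : s.contains q.1 = true
      · rw [if_pos hc, ih]
        have hm : q.1 ∈ s.keys := (PySem.Dict.contains_iff_mem_keys s q.1).mp hc
        show _ = PySem.Set.update (PySem.Set.add s.keys q.1) (es.map _)
        rw [show PySem.Set.add s.keys q.1 = s.keys from by simp [PySem.Set.add, hm]]
      · rw [if_neg hc, ih]
        have hk : (s.insert q.1 (List.replicate n "0")).keys = s.keys ++ [q.1] :=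
          PySem.Dict.keys_insert_of_not_contains s _ (by simpa using hc)
        rw [hk]
        show PySem.Set.update (s.keys ++ [q.1]) _ = PySem.Set.update (PySem.Set.add s.keys q.1) _
        have hm : q.1 ∉ s.keys := fun h =>
          hc ((PySem.Dict.contains_iff_mem_keys s q.1).mpr h)
        rw [show PySem.Set.add s.keys q.1 = s.keys ++ [q.1] from by simp [PySem.Set.add, hm]]

-- keys of B's whole first phase = deduped flattened key list
theorem pv_keys_series0 (n : Nat) (l : List (String × List (String × Int)))
    (s : PySem.Dict String (List String)) :
    (l.foldl (fun s p => p.2.foldl (fun s q =>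
        if s.contains q.1 then s else s.insert q.1 (List.replicate n "0")) s) s).keys
      = PySem.Set.update s.keys (l.flatMap (fun p => p.2.map (fun q => q.1))) := by
  induction l generalizing s with
  | nil => rfl
  | cons p l ih =>
      simp only [List.foldl_cons, List.flatMap_cons]
      rw [ih, pv_keys_guardfold]
      simp only [PySem.Set.update, List.foldl_append]

-- every value of B's first phase is the "0"-filled series
theorem pv_getD_series0 (n : Nat) (l : List (String × List (String × Int)))
    (s : PySem.Dict String (List String))
    (hs : ∀ t, s.contains t = true → s.getD t [] = List.replicate n "0") (t : String)
    (ht : (l.foldl (fun s p => p.2.foldl (fun s q =>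
        if s.contains q.1 then s else s.insert q.1 (List.replicate n "0")) s) s).contains t = true) :
    (l.foldl (fun s p => p.2.foldl (fun s q =>
        if s.contains q.1 then s else s.insert q.1 (List.replicate n "0")) s) s).getD t []
      = List.replicate n "0" := by
  induction l generalizing s with
  | nil => exact hs t ht
  | cons p l ih =>
      simp only [List.foldl_cons] at ht ⊢
      refine ih _ ?_ ht
      -- the inner guarded loop preserves the invariant
      clear ht ih
      induction p.2 generalizing s with
      | nil => exact hs
      | cons q es ihe =>
          simp only [List.foldl_cons]
          by_cases hc : s.contains q.1 = true
          · rw [if_pos hc]; exact ihe s hs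
          · rw [if_neg hc]
            refine ihe _ ?_
            intro u hu
            rw [PySem.Dict.getD_insert]
            by_cases he : u = q.1
            · simp [he]
            · rw [if_neg he]
              refine hs u ?_
              have := (PySem.Dict.contains_insert s q.1 u (List.replicate n "0")) ▸ hu
              simpa [he] using this

-- one date of B's second phase, at key t
theorem pv_perdate (es : List (String × Int)) (g : String → String) (i : Int) (hi : 0 ≤ i)
    (s : PySem.Dict String (List String)) (t : String) :
    (es.foldl (fun s q => s.modify q.1 [] (fun l => PySem.List.pySetD l i (g q.1))) s).getD t []
      = if t ∈ es.map (fun q => q.1) then PySem.List.pySetD (s.getD t []) i (g t)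
        else s.getD t [] := by
  induction es generalizing s with
  | nil => simp
  | cons q es ih =>
      simp only [List.foldl_cons, List.map_cons]
      rw [ih]
      by_cases he : t = q.1
      · subst he
        by_cases hm : q.1 ∈ es.map (fun q => q.1)
        · rw [if_pos hm, if_pos (by simp), PySem.Dict.getD_modify, if_pos rfl,
            PySem.List.pySetD_of_nonneg _ _ hi, PySem.List.pySetD_of_nonneg _ _ hi]
          exact List.set_set ..
        · rw [if_neg hm, if_pos (by simp), PySem.Dict.getD_modify, if_pos rfl]
      · rw [PySem.Dict.getD_modify, if_neg he]
        by_cases hm : t ∈ es.map (fun q => q.1)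
        · rw [if_pos hm, if_pos (List.mem_cons_of_mem _ hm)]
        · rw [if_neg hm, if_neg (by simp [hm, he])]

-- B's second phase fills topic t's series position by position
theorem pv_main_inv (l : List (String × List (String × Int))) (pre : List String)
    (s : PySem.Dict String (List String)) (t : String)
    (hs : s.getD t [] = pre ++ List.replicate l.length "0") :
    ((PySem.List.enumerate l (pre.length : Int)).foldl (fun s ip =>
        ip.2.2.foldl (fun s q =>
          s.modify q.1 [] (fun v =>
            PySem.List.pySetD v ip.1 (PySem.Int.toStr ((PySem.Dict.mk ip.2.2).getD q.1 0)))) s) s).getD t []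
      = pre ++ l.map (fun p => pvEntry p.2 t) := by
  induction l generalizing pre s with
  | nil => simpa [PySem.List.enumerate] using hs
  | cons p l ih =>
      rw [PySem.List.enumerate_cons, List.foldl_cons]
      have hstep : (p.2.foldl (fun s q =>
          s.modify q.1 [] (fun v =>
            PySem.List.pySetD v ((pre.length : Int)) (PySem.Int.toStr ((PySem.Dict.mk p.2).getD q.1 0)))) s).getD t []
          = (pre ++ [pvEntry p.2 t]) ++ List.replicate l.length "0" := by
        rw [pv_perdate p.2 (fun u => PySem.Int.toStr ((PySem.Dict.mk p.2).getD u 0))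
          (pre.length : Int) (by positivity) s t]
        rw [hs]
        have hrep : List.replicate (p :: l).length "0" = "0" :: List.replicate l.length ("0" : String) := rfl
        rw [hrep]
        by_cases hm : t ∈ p.2.map (fun q => q.1)
        · rw [if_pos hm]
          have hc : (PySem.Dict.mk p.2).contains t = true := by
            rw [PySem.Dict.contains_mk]
            simp only [List.mem_map] at hm
            obtain ⟨q, hq, hqt⟩ := hm
            exact List.any_eq_true.mpr ⟨q, hq, by simp [hqt]⟩
          simp [pvEntry, hc]
        · rw [if_neg hm]
          have hc : (PySem.Dict.mk p.2).contains t = false := by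
            rw [PySem.Dict.contains_mk]
            simp only [List.any_eq_false, beq_iff_eq]
            intro q hq hqt
            exact hm (List.mem_map.mpr ⟨q, hq, hqt⟩)
          simp [pvEntry, hc]
      have hlen : (pre.length : Int) + 1 = ((pre ++ [pvEntry p.2 t]).length : Int) := by
        simp
      rw [hlen, ih (pre ++ [pvEntry p.2 t]) _ hstep]
      simp

-- keys are unchanged by B's second phase when every written key is already present
theorem pv_keys_phase2 (el : List (Int × String × List (String × Int)))
    (s : PySem.Dict String (List String))
    (h : ∀ ip ∈ el, ∀ q ∈ ip.2.2, q.1 ∈ s.keys) :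
    (el.foldl (fun s ip =>
        ip.2.2.foldl (fun s q =>
          s.modify q.1 [] (fun v =>
            PySem.List.pySetD v ip.1 (PySem.Int.toStr ((PySem.Dict.mk ip.2.2).getD q.1 0)))) s) s).keys
      = s.keys := by
  induction el generalizing s with
  | nil => rfl
  | cons ip el ih =>
      simp only [List.foldl_cons]
      have hk : (ip.2.2.foldl (fun s q =>
          s.modify q.1 [] (fun v =>
            PySem.List.pySetD v ip.1 (PySem.Int.toStr ((PySem.Dict.mk ip.2.2).getD q.1 0)))) s).keys
          = s.keys := by
        rw [PySem.Dict.keys_foldl_modify_key]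
        exact pv_update_self s.keys _ (by
          intro x hx
          simp only [List.mem_map] at hx
          obtain ⟨q, hq, hqx⟩ := hx
          exact hqx ▸ h ip (List.mem_cons_self ..) q hq)
      rw [ih _ (by
        intro jp hjp q hq
        rw [hk]
        exact h jp (List.mem_cons_of_mem _ hjp) q hq), hk]

-- ===== VERDICT (by name: the statement is the Claim_ definition above) =====
theorem create_time_series_spec : Claim_equal_create_time_series := by
  intro topic_d _
  show create_time_series topic_d = create_time_series_alt topic_d
  unfold create_time_series create_time_series_alt
  simp only []
  set flat := topic_d.flatMap (fun p => p.2.map (fun q => q.1)) with hflat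
  have htop : topic_d.foldl (fun s p => p.2.foldl (fun s q => s.add q.1) s) PySem.Set.empty
      = PySem.Set.ofList flat := by
    rw [pv_topics_eq]; rfl
  rw [htop]
  set topics := PySem.Set.ofList flat with htopics
  have hnd : topics.Nodup := PySem.Set.nodup_ofList flat
  set sortedItems := PySem.List.sorted topic_d (fun p => p.1) false with hsorted
  set n := sortedItems.length with hn
  -- A side
  set fA : String → List String :=
    fun t => sortedItems.foldl (fun series p => series ++ [pvEntry p.2 t]) [] with hfA
  have hkeysA : (topics.foldl (fun d t => d.insert t (fA t))
      (topics.foldl (fun d t => d.insert t ([] : List String)) PySem.Dict.empty)).keys = topics := by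
    rw [PySem.Dict.keys_foldl_insert, pv_keys_foldl_insert_empty _ _ hnd]
    exact pv_update_self topics topics (fun x hx => hx)
  -- B side
  set series0 := topic_d.foldl (fun s p => p.2.foldl (fun s q =>
      if s.contains q.1 then s else s.insert q.1 (List.replicate n "0")) s) PySem.Dict.empty
    with hser0
  have hkeys0 : series0.keys = topics := by
    rw [hser0, pv_keys_series0]; rfl
  have hmem0 : ∀ t ∈ flat, series0.contains t = true := by
    intro t ht
    exact (PySem.Dict.contains_iff_mem_keys series0 t).mpr
      (hkeys0 ▸ (PySem.Set.mem_ofList ..).mpr ht)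
  set series := (PySem.List.enumerate sortedItems 0).foldl (fun s ip =>
      ip.2.2.foldl (fun s q =>
        s.modify q.1 [] (fun l =>
          PySem.List.pySetD l ip.1 (PySem.Int.toStr ((PySem.Dict.mk ip.2.2).getD q.1 0)))) s) series0
    with hser
  have hflatmem : ∀ ip ∈ PySem.List.enumerate sortedItems 0, ∀ q ∈ ip.2.2, q.1 ∈ series0.keys := by
    intro ip hip q hq
    have hip2 : ip.2 ∈ sortedItems := by
      have := (PySem.List.map_snd_enumerate sortedItems 0) ▸ List.mem_map_of_mem hip
      exact this
    have hmem : ip.2 ∈ topic_d := (PySem.List.sorted_perm topic_d (fun p => p.1) false).mem_iff.mp hip2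
    have : q.1 ∈ flat := by
      rw [hflat]
      exact List.mem_flatMap.mpr ⟨ip.2, hmem, List.mem_map_of_mem hq⟩
    rw [hkeys0]
    exact (PySem.Set.mem_ofList ..).mpr this
  have hkeysB : series.keys = topics := by
    rw [hser, pv_keys_phase2 _ _ hflatmem, hkeys0]
  rw [PySem.Dict.items_eq_map_keys _ (by rw [hkeysA]; exact hnd) [],
    PySem.Dict.items_eq_map_keys _ (by rw [hkeysB]; exact hnd) []]
  rw [hkeysA, hkeysB]
  apply List.map_congr_left
  intro t ht
  have hA : (topics.foldl (fun d t => d.insert t (fA t))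
      (topics.foldl (fun d t => d.insert t ([] : List String)) PySem.Dict.empty)).getD t [] = fA t :=
    pv_getD_foldl_insert_mem topics fA _ t [] hnd ht
  have h0 : series0.getD t [] = List.replicate n "0" := by
    refine pv_getD_series0 n topic_d PySem.Dict.empty (by simp) t ?_
    rw [← hser0]
    exact hmem0 t ((PySem.Set.mem_ofList ..).mp (htopics ▸ ht))
  have hB : series.getD t [] = sortedItems.map (fun p => pvEntry p.2 t) := by
    rw [hser]
    have h00 : (0 : Int) = (([] : List String).length : Int) := by simp
    rw [h00]
    exact pv_main_inv sortedItems [] series0 t (by simpa using h0)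
  rw [hA, hB]
  show (t, List.foldl (fun series p => series ++ [pvEntry p.2 t]) [] sortedItems) = _
  rw [PySem.List.foldl_append_singleton_eq_map (fun p => pvEntry p.2 t) sortedItems []]
  simp
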